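-- pv_equiv track=rewrite | github.com/mcxu/code-sandbox | PythonSandbox/leetcode/1451_rearrange_words_in_sentence.py | arrangeWords
-- ===== SOURCE A (Python) =====
-- def arrangeWords(text: str) -> str:
--     textSplit = text.split(" ")
--     aux = []
--     for i,word in enumerate(textSplit):
--         aux.append((word,len(word)))
--     aux = sorted(aux, key=lambda x: x[1])
--
--     newText = ""
--     for j,tup in enumerate(aux):
--         wrd = tup[0]
--         if j == 0:
--             wrd = wrd[0].upper() + wrd[1:]
--         else:
--             wrd = wrd.lower()
--         newText += (wrd + " ")
--
--     return newText[:-1]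
-- ===== SOURCE B (Python) =====
-- def arrangeWords(text: str) -> str:
--     # Counting/bucket sort by word length instead of a comparison sort.
--     words = text.split(" ")
--     longest = 0
--     for w in words:
--         if len(w) > longest:
--             longest = len(w)
--     ordered = []
--     for l in range(longest + 1):
--         ordered += [w for w in words if len(w) == l]
--     first = ordered[0]
--     parts = [first[0].upper() + first[1:]]
--     for w in ordered[1:]:
--         parts.append(w.lower())
--     return " ".join(parts)
-- ===== Notes on version B (the rewrite author's own statement) =====
-- stated objective: alternative
-- what changed: Replaces the comparison sort of (word, length) pairs by a counting/bucket pass: compute the maximum word length, then collect the words length by length from 0 to the maximum (preserving input order inside each length), which yields the same stable order.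
-- outside the precondition, e.g. on arrangeWords(''): A raises IndexError, B raises IndexError; on arrangeWords('a  b'): A raises IndexError, B raises IndexError
import Mathlib
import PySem

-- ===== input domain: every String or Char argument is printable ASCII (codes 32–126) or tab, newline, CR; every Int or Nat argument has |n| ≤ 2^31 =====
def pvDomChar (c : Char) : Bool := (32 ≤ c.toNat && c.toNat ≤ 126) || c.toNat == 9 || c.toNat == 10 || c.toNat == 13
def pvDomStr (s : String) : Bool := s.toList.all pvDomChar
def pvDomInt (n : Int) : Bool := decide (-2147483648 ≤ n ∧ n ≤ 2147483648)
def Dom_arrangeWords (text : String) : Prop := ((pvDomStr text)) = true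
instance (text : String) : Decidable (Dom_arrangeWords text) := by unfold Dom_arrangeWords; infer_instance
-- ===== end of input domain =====

-- B replaces A's comparison sort of (word, len) pairs by a counting/bucket pass over word lengths
-- (filter the words once per length 0..max, in order), keeping the same first-word capitalisation.

-- ===== PORT A =====
def arrangeWords (text : String) : String :=
  let textSplit := PySem.Chars.splitOn text.toList [' ']
  let aux : List (List Char × Int) :=
    (PySem.List.enumerate textSplit).foldl (fun acc p => acc ++ [(p.2, PySem.Chars.len p.2)]) []
  let aux2 := PySem.List.sorted aux (fun x => x.2)
  let newText : List Char :=
    (PySem.List.enumerate aux2).foldl (fun acc p =>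
      acc ++ ((if p.1 == 0 then
          (match PySem.List.pyGet? p.2.1 0 with
           | some c => PySem.Chars.upperChar c :: PySem.List.slice p.2.1 (some 1) none
           | none => [])
        else PySem.Chars.lower p.2.1) ++ [' '])) []
  String.ofList (PySem.List.slice newText none (some (-1)))

-- ===== PORT B =====
def arrangeWords_alt (text : String) : String :=
  let words := PySem.Chars.splitOn text.toList [' ']
  let longest := words.foldl (fun acc w => if PySem.Chars.len w > acc then PySem.Chars.len w else acc) 0
  let ordered := (PySem.List.pyRange 0 (longest + 1) 1).foldl
      (fun acc l => acc ++ words.filter (fun w => PySem.Chars.len w == l)) []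
  match ordered with
  | [] => ""
  | f :: rest =>
    let first : List Char :=
      match PySem.List.pyGet? f 0 with
      | some c => PySem.Chars.upperChar c :: PySem.List.slice f (some 1) none
      | none => []
    let parts := rest.foldl (fun acc w => acc ++ [PySem.Chars.lower w]) [first]
    String.ofList (PySem.Chars.join [' '] parts)

-- ===== PRECONDITION & SPEC =====
-- Pre_ excludes exactly the texts whose split contains an empty word (empty text, leading/trailing
-- or doubled spaces): there the shortest word is "", and Python A raises IndexError on wrd[0]
-- (B raises the same IndexError on first[0]).
def Pre_arrangeWords (text : String) : Prop := [] ∉ PySem.Chars.splitOn text.toList [' ']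
instance (text : String) : Decidable (Pre_arrangeWords text) := by unfold Pre_arrangeWords; infer_instance
def pvWitness_arrangeWords : String := "keep CALM and CODE on"

def Spec_arrangeWords (text : String) (out : String) : Prop := out = arrangeWords_alt text
instance (text : String) (out : String) : Decidable (Spec_arrangeWords text out) := by unfold Spec_arrangeWords; infer_instance

-- ===== CLAIM (what is proved, stated in full; the proofs are below) =====
def Claim_equal_arrangeWords : Prop := ∀ (text : String), Dom_arrangeWords text → Pre_arrangeWords text → Spec_arrangeWords text (arrangeWords text)

-- ===== LEMMAS AND PROOFS =====

lemma insertBy_append_of_not {α : Type} (b : α → α → Bool) (x : α) (pre rest : List α)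
    (h : ∀ y ∈ pre, b x y = false) :
    PySem.List.insertBy b x (pre ++ rest) = pre ++ PySem.List.insertBy b x rest := by
  induction pre with
  | nil => simp
  | cons y ys ih =>
    have hy : b x y = false := h y (by simp)
    simp [PySem.List.insertBy, hy, ih (fun z hz => h z (by simp [hz]))]

lemma insertBy_all_before {α : Type} (b : α → α → Bool) (x : α) (rest : List α)
    (h : ∀ y ∈ rest, b x y = true) :
    PySem.List.insertBy b x rest = x :: rest := by
  cases rest with
  | nil => simp [PySem.List.insertBy]
  | cons y ys => simp [PySem.List.insertBy, h y (by simp)]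

lemma insertBy_bucket {α : Type} (key : α → Int) (x : α) (ks : List Int) (F : Int → List α)
    (hks : ks.Pairwise (· < ·)) (hx : key x ∈ ks)
    (hF : ∀ l ∈ ks, ∀ y ∈ F l, key y = l) :
    PySem.List.insertBy (fun a b => decide (key a < key b)) x (ks.flatMap F)
      = ks.flatMap (fun l => F l ++ if key x == l then [x] else []) := by
  induction ks with
  | nil => simp at hx
  | cons k ks ih =>
    have hgt : ∀ l ∈ ks, k < l := (List.pairwise_cons.1 hks).1
    simp only [List.flatMap_cons]
    by_cases hk : key x = k
    · rw [insertBy_append_of_not _ _ _ _ (fun y hy => by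
        have hyk := hF k (by simp) y hy
        simp [hyk, hk])]
      rw [insertBy_all_before _ _ _ (fun y hy => by
        obtain ⟨l, hl, hyl⟩ := List.mem_flatMap.1 hy
        have hyk := hF l (by simp [hl]) y hyl
        have := hgt l hl
        simp [hyk, hk]; omega)]
      have hrest : ks.flatMap (fun l => F l ++ if key x == l then [x] else []) = ks.flatMap F := by
        apply List.flatMap_congr
        intro l hl
        have := hgt l hl
        have : (key x == l) = false := by simp; omega
        simp [this]
      rw [hrest]
      simp [hk]
    · have hx' : key x ∈ ks := by
        rcases List.mem_cons.1 hx with h | h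
        · exact absurd h hk
        · exact h
      have hxk : k < key x := hgt _ hx'
      rw [insertBy_append_of_not _ _ _ _ (fun y hy => by
        have hyk := hF k (by simp) y hy
        simp [hyk]; omega)]
      rw [ih (List.pairwise_cons.1 hks).2 hx' (fun l hl => hF l (by simp [hl]))]
      have : (key x == k) = false := by simp [hk]
      simp [this]

lemma sorted_bucket {α : Type} (key : α → Int) (xs : List α) (a b : Int)
    (h : ∀ x ∈ xs, key x ∈ PySem.List.pyRange a b 1) :
    PySem.List.sorted xs key
      = (PySem.List.pyRange a b 1).flatMap (fun l => xs.filter (fun x => key x == l)) := by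
  rw [PySem.List.sorted_eq_foldl_insertBy]
  induction xs using List.reverseRecOn with
  | nil => simp
  | append_singleton xs x ih =>
    rw [List.foldl_append, List.foldl_cons, List.foldl_nil]
    rw [ih (fun y hy => h y (by simp [hy]))]
    rw [insertBy_bucket key x _ _ (PySem.List.pairwise_lt_pyRange_one a b) (h x (by simp))
        (fun l hl y hy => by simpa using (List.mem_filter.1 hy).2)]
    apply List.flatMap_congr
    intro l _
    by_cases hkl : key x = l <;> simp [List.filter_append, hkl]

-- the body of A's output-building loop, over an enumerated tail (index ≥ 1): every word is lowered
lemma pvTailFold (ps : List (List Char × Int)) : ∀ (s : Int), 1 ≤ s → ∀ (acc : List Char),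
    (PySem.List.enumerate ps s).foldl (fun acc p =>
      acc ++ ((if p.1 == 0 then
          (match PySem.List.pyGet? p.2.1 0 with
           | some c => PySem.Chars.upperChar c :: PySem.List.slice p.2.1 (some 1) none
           | none => [])
        else PySem.Chars.lower p.2.1) ++ [' '])) acc
      = acc ++ ps.flatMap (fun p => PySem.Chars.lower p.1 ++ [' ']) := by
  induction ps with
  | nil => intro s _ acc; simp [PySem.List.enumerate_nil]
  | cons p ps ih =>
    intro s hs acc
    rw [PySem.List.enumerate_cons, List.foldl_cons]
    have hs0 : (s == 0) = false := by simp; omega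
    simp only [hs0, Bool.false_eq_true, if_false]
    rw [ih (s + 1) (by omega)]
    simp

lemma pvJoinSpace (ts : List (List Char)) : ∀ (F : List Char),
    ((F ++ [' ']) ++ ts.flatMap (fun t => t ++ [' '])).dropLast = PySem.Chars.join [' '] (F :: ts) := by
  induction ts with
  | nil => intro F; simp [PySem.Chars.join, List.intercalate]
  | cons t ts ih =>
    intro F
    have : ((F ++ [' ']) ++ (t :: ts).flatMap (fun t => t ++ [' '])).dropLast
        = (((F ++ [' '] ++ t) ++ [' ']) ++ ts.flatMap (fun t => t ++ [' '])).dropLast := by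
      simp [List.flatMap_cons]
    rw [this, ih]
    simp only [PySem.Chars.join, List.intercalate]
    cases ts with
    | nil => simp
    | cons u us => simp [List.intersperse]

-- ===== VERDICT (by name: the statement is the Claim_ definition above) =====
theorem arrangeWords_spec : Claim_equal_arrangeWords := by
  intro text _ _
  unfold Spec_arrangeWords arrangeWords arrangeWords_alt
  dsimp only
  set ws := PySem.Chars.splitOn text.toList [' '] with hws
  -- A's first loop builds the (word, length) pair list
  have haux : (PySem.List.enumerate ws).foldl (fun acc p => acc ++ [(p.2, PySem.Chars.len p.2)]) []
      = ws.map (fun w => (w, PySem.Chars.len w)) := by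
    have h1 := PySem.List.foldl_append_singleton_eq_map
      (fun p : Int × List Char => (p.2, PySem.Chars.len p.2)) (PySem.List.enumerate ws) []
    simp only [List.nil_append] at h1
    rw [h1, show (fun (p : Int × List Char) => (p.2, PySem.Chars.len p.2))
        = (fun w => (w, PySem.Chars.len w)) ∘ (fun p => p.2) from rfl]
    rw [← List.map_map, PySem.List.map_snd_enumerate]
  rw [haux]
  -- B's running max dominates every word length
  set longest := ws.foldl (fun acc w => if PySem.Chars.len w > acc then PySem.Chars.len w else acc) 0
    with hlongest
  have hmax : ∀ w ∈ ws, PySem.Chars.len w ≤ longest := by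
    have hfold : ws.foldl (fun acc w => if PySem.Chars.len w > acc then PySem.Chars.len w else acc) 0
        = ws.foldl (fun acc w => max acc (PySem.Chars.len w)) 0 := by
      apply PySem.List.foldl_congr_mem
      intro acc w _
      rcases lt_trichotomy acc (PySem.Chars.len w) with h | h | h <;> simp [h, max_def] <;> omega
    rw [hlongest, hfold]
    exact (PySem.List.le_foldl_max_int ws PySem.Chars.len 0).2
  have hlen0 : ∀ w : List Char, 0 ≤ PySem.Chars.len w := by
    intro w; simp [PySem.Chars.len]
  -- the stable sort by length is the concatenation of the length buckets
  have hkey : ∀ p ∈ ws.map (fun w => (w, PySem.Chars.len w)),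
      (fun x : List Char × Int => x.2) p ∈ PySem.List.pyRange 0 (longest + 1) 1 := by
    intro p hp
    obtain ⟨w, hw, rfl⟩ := List.mem_map.1 hp
    simp only [PySem.List.mem_pyRange_one]
    exact ⟨hlen0 w, by have := hmax w hw; omega⟩
  rw [sorted_bucket _ _ 0 (longest + 1) hkey]
  -- B's bucket loop builds the same concatenation, on the bare words
  have hord : (PySem.List.pyRange 0 (longest + 1) 1).foldl
        (fun acc l => acc ++ ws.filter (fun w => PySem.Chars.len w == l)) []
      = (PySem.List.pyRange 0 (longest + 1) 1).flatMap
        (fun l => ws.filter (fun w => PySem.Chars.len w == l)) := by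
    have h2 := PySem.List.foldl_append_eq_flatMap
      (fun l => ws.filter (fun w => PySem.Chars.len w == l)) (PySem.List.pyRange 0 (longest + 1) 1) []
    simpa using h2
  rw [hord]
  have hbucket : (PySem.List.pyRange 0 (longest + 1) 1).flatMap
        (fun l => (ws.map (fun w => (w, PySem.Chars.len w))).filter (fun x => x.2 == l))
      = ((PySem.List.pyRange 0 (longest + 1) 1).flatMap
        (fun l => ws.filter (fun w => PySem.Chars.len w == l))).map (fun w => (w, PySem.Chars.len w)) := by
    rw [List.map_flatMap]
    apply List.flatMap_congr
    intro l _
    rw [List.filter_map]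
    rfl
  rw [hbucket]
  set R := (PySem.List.pyRange 0 (longest + 1) 1).flatMap
      (fun l => ws.filter (fun w => PySem.Chars.len w == l)) with hR
  -- now both sides are functions of the same ordered word list R
  cases R with
  | nil =>
    simp [PySem.List.enumerate_nil, PySem.List.slice]
  | cons f rest =>
    simp only [List.map_cons]
    rw [PySem.List.enumerate_cons, List.foldl_cons]
    simp only [List.nil_append, beq_self_eq_true, if_true, zero_add]
    have htail := pvTailFold (rest.map (fun w => (w, PySem.Chars.len w))) 1 (by omega)
    rw [htail]
    rw [List.flatMap_map]
    have hparts := PySem.List.foldl_append_singleton_eq_map PySem.Chars.lower rest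
    rw [hparts]
    rw [PySem.List.slice_to_neg_one]
    dsimp only
    rw [← List.flatMap_map PySem.Chars.lower (fun t => t ++ [' ']) rest]
    rw [pvJoinSpace (rest.map PySem.Chars.lower)]
    simp
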